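-- pv_equiv track=rewrite | github.com/ivangeorgiev/walk-replace | devopslib/fileutil.py | pivot_mapping
-- ===== SOURCE A (Python) =====
-- def pivot_mapping(mapping:dict, key_prefix:str='key.', value_prefix:str='value.'):
--     """Convert pivoted mapping into simple mapping.
--
--     Example:
--     >>> input_map = {
--     ...              'search.name': '<name>',
--     ...              'replace.name': 'John',
--     ...              'search.age': '<age>',
--     ...              }
--     >>> pivot_mapping(input_map, 'search.', 'replace.')
--     {'<name>': 'John', '<age>': ''}
--     """
--     result = {}
--     for key, value in mapping.items():
--         if not key.startswith(key_prefix):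
--             continue
--         key_name = key[len(key_prefix):]
--         result[value] = mapping.get(value_prefix + key_name, '')
--     return result
-- ===== SOURCE B (Python) =====
-- def pivot_mapping(mapping: dict, key_prefix: str = 'key.', value_prefix: str = 'value.'):
--     """Convert pivoted mapping into simple mapping (two-table join)."""
--     n = len(key_prefix)
--     m = len(value_prefix)
--     search = {k[n:]: v for k, v in mapping.items() if k.startswith(key_prefix)}
--     replace = {k[m:]: v for k, v in mapping.items() if k.startswith(value_prefix)}
--     return {search[s]: replace.get(s, '') for s in search}
-- ===== Notes on version B (the rewrite author's own statement) =====
-- stated objective: alternative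
-- what changed: Replaces A's single pass that looks up value_prefix+suffix directly in the original mapping with a build-two-suffix-tables-then-join decomposition: two comprehensions index search and replace entries by suffix, and the result joins them over search's suffixes.
import Mathlib
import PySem

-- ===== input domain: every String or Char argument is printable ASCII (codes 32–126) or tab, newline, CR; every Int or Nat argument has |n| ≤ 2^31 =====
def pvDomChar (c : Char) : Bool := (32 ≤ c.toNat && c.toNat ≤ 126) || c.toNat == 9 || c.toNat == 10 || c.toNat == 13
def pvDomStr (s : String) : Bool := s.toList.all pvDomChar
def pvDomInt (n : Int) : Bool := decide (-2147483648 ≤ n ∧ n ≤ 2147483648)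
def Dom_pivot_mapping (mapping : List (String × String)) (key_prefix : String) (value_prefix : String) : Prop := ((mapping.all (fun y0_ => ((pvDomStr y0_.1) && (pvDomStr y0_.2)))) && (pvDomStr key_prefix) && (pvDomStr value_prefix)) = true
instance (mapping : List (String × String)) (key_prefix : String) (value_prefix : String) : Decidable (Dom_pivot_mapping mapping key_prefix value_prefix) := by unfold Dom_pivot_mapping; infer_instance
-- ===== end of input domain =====

-- B rewrites A's single pass (lookup value_prefix+suffix in the original mapping) as a
-- build-two-suffix-tables-then-join decomposition; objective: alternative (same cost).


-- ===== PORT A =====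
-- key[len(key_prefix):] is ported as toList.drop (exact: the index is a nonnegative length);
-- value_prefix + key_name is String.ofList of the concatenated character lists;
-- mapping.get(k, '') is (PySem.Dict.mk mapping).getD k "" (first-match lookup on the assoc list).
def pivot_mapping (mapping : List (String × String)) (key_prefix : String) (value_prefix : String) : List (String × String) :=
  (mapping.foldl
    (fun (result : PySem.Dict String String) kv =>
      if PySem.Str.startswith kv.1 key_prefix then
        result.insert kv.2
          ((PySem.Dict.mk mapping).getD
            (String.ofList (value_prefix.toList ++ kv.1.toList.drop key_prefix.toList.length)) "")
      else result)
    PySem.Dict.empty).items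

-- ===== PORT B =====
def pivot_mapping_alt (mapping : List (String × String)) (key_prefix : String) (value_prefix : String) : List (String × String) :=
  let n := key_prefix.toList.length
  let m := value_prefix.toList.length
  let search := mapping.foldl
    (fun (d : PySem.Dict String String) kv =>
      if PySem.Str.startswith kv.1 key_prefix then d.insert (String.ofList (kv.1.toList.drop n)) kv.2 else d)
    PySem.Dict.empty
  let replace := mapping.foldl
    (fun (d : PySem.Dict String String) kv =>
      if PySem.Str.startswith kv.1 value_prefix then d.insert (String.ofList (kv.1.toList.drop m)) kv.2 else d)
    PySem.Dict.empty
  (search.keys.foldl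
    (fun (r : PySem.Dict String String) s => r.insert (search.getD s "") (replace.getD s ""))
    PySem.Dict.empty).items

-- ===== PRECONDITION & SPEC =====
-- Pre_ requires the association list's keys to be distinct: a list with duplicate keys
-- represents no Python dict at all (A's parameter is a dict), so nothing is claimed there.
def Pre_pivot_mapping (mapping : List (String × String)) (key_prefix : String) (value_prefix : String) : Prop :=
  (mapping.map Prod.fst).Nodup
instance (mapping : List (String × String)) (key_prefix : String) (value_prefix : String) : Decidable (Pre_pivot_mapping mapping key_prefix value_prefix) := by unfold Pre_pivot_mapping; infer_instance

def pvWitness_pivot_mapping : (List (String × String)) × String × String :=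
  ([("search.name", "<name>"), ("replace.name", "John"), ("search.age", "<age>")], "search.", "replace.")

def Spec_pivot_mapping (mapping : List (String × String)) (key_prefix : String) (value_prefix : String) (out : List (String × String)) : Prop := out = pivot_mapping_alt mapping key_prefix value_prefix
instance (mapping : List (String × String)) (key_prefix : String) (value_prefix : String) (out : List (String × String)) : Decidable (Spec_pivot_mapping mapping key_prefix value_prefix out) := by unfold Spec_pivot_mapping; infer_instance

-- ===== CLAIM (what is proved, stated in full; the proofs are below) =====
def Claim_equal_pivot_mapping : Prop := ∀ (mapping : List (String × String)) (key_prefix : String) (value_prefix : String), Dom_pivot_mapping mapping key_prefix value_prefix → Pre_pivot_mapping mapping key_prefix value_prefix → Spec_pivot_mapping mapping key_prefix value_prefix (pivot_mapping mapping key_prefix value_prefix)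

-- ===== LEMMAS AND PROOFS =====

-- a guarded foldl is a foldl over the filtered list
theorem pvFoldlFilterIf {α β : Type} (l : List α) (p : α → Bool) (f : β → α → β) (a : β) :
    l.foldl (fun acc x => if p x then f acc x else acc) a = (l.filter p).foldl f a := by
  induction l generalizing a with
  | nil => rfl
  | cons x xs ih =>
      by_cases h : p x = true
      · simp [List.filter_cons, h, ih]
      · simp only [Bool.not_eq_true] at h
        simp [List.filter_cons, h, ih]

theorem pvPrefixRecon {k p : String} (h : PySem.Str.startswith k p = true) :
    k.toList = p.toList ++ k.toList.drop p.toList.length := by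
  rw [PySem.Str.startswith_eq, PySem.Chars.startswith_iff] at h
  obtain ⟨t, ht⟩ := h
  rw [← ht, List.drop_left]

theorem pvOfListInj {a b : List Char} (h : String.ofList a = String.ofList b) : a = b := by
  have := congrArg String.toList h; simpa using this

-- items of a suffix-table built by a guarded insert loop, for a mapping with distinct keys
theorem pvTableItems (mapping : List (String × String)) (p : String)
    (hnd : (mapping.map Prod.fst).Nodup) :
    (mapping.foldl
      (fun (d : PySem.Dict String String) kv =>
        if PySem.Str.startswith kv.1 p then d.insert (String.ofList (kv.1.toList.drop p.toList.length)) kv.2 else d)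
      PySem.Dict.empty).items
    = (mapping.filter (fun kv => PySem.Str.startswith kv.1 p)).map
        (fun kv => (String.ofList (kv.1.toList.drop p.toList.length), kv.2)) := by
  rw [pvFoldlFilterIf]
  have hsub : ((mapping.filter (fun kv => PySem.Str.startswith kv.1 p)).map Prod.fst).Sublist
      (mapping.map Prod.fst) := List.Sublist.map _ List.filter_sublist
  have hndf : ((mapping.filter (fun kv => PySem.Str.startswith kv.1 p)).map Prod.fst).Nodup :=
    List.Nodup.sublist hsub hnd
  have hinj : ((mapping.filter (fun kv => PySem.Str.startswith kv.1 p)).map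
      (fun kv => String.ofList (kv.1.toList.drop p.toList.length))).Nodup := by
    have : (mapping.filter (fun kv => PySem.Str.startswith kv.1 p)).map
        (fun kv => String.ofList (kv.1.toList.drop p.toList.length))
        = ((mapping.filter (fun kv => PySem.Str.startswith kv.1 p)).map Prod.fst).map
            (fun k => String.ofList (k.toList.drop p.toList.length)) := by
      simp [List.map_map, Function.comp]
    rw [this]
    refine List.Nodup.map_on ?_ hndf
    intro x hx y hy hxy
    have hxs : PySem.Str.startswith x p = true := by
      obtain ⟨kv, hkv, rfl⟩ := List.mem_map.mp hx
      exact (List.mem_filter.mp hkv).2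
    have hys : PySem.Str.startswith y p = true := by
      obtain ⟨kv, hkv, rfl⟩ := List.mem_map.mp hy
      exact (List.mem_filter.mp hkv).2
    have hd := pvOfListInj hxy
    have : x.toList = y.toList := by
      rw [pvPrefixRecon hxs, pvPrefixRecon hys, hd]
    have := congrArg String.ofList this; simpa using this
  have := PySem.Dict.items_foldl_insert_fresh
      (mapping.filter (fun kv => PySem.Str.startswith kv.1 p))
      (fun kv => String.ofList (kv.1.toList.drop p.toList.length)) (fun kv => kv.2)
      PySem.Dict.empty (by intro a _; simp) hinj
  simpa using this

theorem pvTableKeysNodup (mapping : List (String × String)) (p : String)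
    (hnd : (mapping.map Prod.fst).Nodup) :
    (mapping.foldl
      (fun (d : PySem.Dict String String) kv =>
        if PySem.Str.startswith kv.1 p then d.insert (String.ofList (kv.1.toList.drop p.toList.length)) kv.2 else d)
      PySem.Dict.empty).keys.Nodup := by
  have h := pvTableItems mapping p hnd
  show ((mapping.foldl _ PySem.Dict.empty).items.map Prod.fst).Nodup
  rw [h]
  -- keys of the table are exactly the suffix images, which pvTableItems' proof showed nodup
  have hsub : ((mapping.filter (fun kv => PySem.Str.startswith kv.1 p)).map Prod.fst).Sublist
      (mapping.map Prod.fst) := List.Sublist.map _ List.filter_sublist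
  have hndf := List.Nodup.sublist hsub hnd
  have : ((mapping.filter (fun kv => PySem.Str.startswith kv.1 p)).map
        (fun kv => (String.ofList (kv.1.toList.drop p.toList.length), kv.2))).map Prod.fst
      = ((mapping.filter (fun kv => PySem.Str.startswith kv.1 p)).map Prod.fst).map
          (fun k => String.ofList (k.toList.drop p.toList.length)) := by
    simp [List.map_map, Function.comp]
  rw [this]
  refine List.Nodup.map_on ?_ hndf
  intro x hx y hy hxy
  have hxs : PySem.Str.startswith x p = true := by
    obtain ⟨kv, hkv, rfl⟩ := List.mem_map.mp hx
    exact (List.mem_filter.mp hkv).2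
  have hys : PySem.Str.startswith y p = true := by
    obtain ⟨kv, hkv, rfl⟩ := List.mem_map.mp hy
    exact (List.mem_filter.mp hkv).2
  have hd := pvOfListInj hxy
  have : x.toList = y.toList := by
    rw [pvPrefixRecon hxs, pvPrefixRecon hys, hd]
  have := congrArg String.ofList this; simpa using this

-- the replace table's lookup agrees with the direct lookup of value_prefix + suffix in the mapping
theorem pvReplaceLookup (mapping : List (String × String)) (vp : String) (s : String)
    (hnd : (mapping.map Prod.fst).Nodup) :
    (mapping.foldl
      (fun (d : PySem.Dict String String) kv =>
        if PySem.Str.startswith kv.1 vp then d.insert (String.ofList (kv.1.toList.drop vp.toList.length)) kv.2 else d)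
      PySem.Dict.empty).getD s ""
    = (PySem.Dict.mk mapping).getD (String.ofList (vp.toList ++ s.toList)) "" := by
  set Q : String × String → Bool := fun kv => PySem.Str.startswith kv.1 vp with hQ
  set tbl := mapping.foldl
      (fun (d : PySem.Dict String String) kv =>
        if PySem.Str.startswith kv.1 vp then d.insert (String.ofList (kv.1.toList.drop vp.toList.length)) kv.2 else d)
      PySem.Dict.empty with htbl
  have hitems := pvTableItems mapping vp hnd
  have hkeys := pvTableKeysNodup mapping vp hnd
  have hmkkeys : (PySem.Dict.mk mapping).keys.Nodup := hnd
  by_cases hc : ∃ kv ∈ mapping.filter Q, String.ofList (kv.1.toList.drop vp.toList.length) = s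
  · obtain ⟨kv, hkvmem, hkvs⟩ := hc
    have hmemitems : (s, kv.2) ∈ tbl.items := by
      rw [htbl, hitems]
      exact List.mem_map.mpr ⟨kv, hkvmem, by rw [hkvs]⟩
    have h1 : tbl.getD s "" = kv.2 := PySem.Dict.getD_of_mem_items tbl hmemitems hkeys ""
    have hst : Q kv = true := (List.mem_filter.mp hkvmem).2
    have hkeq : String.ofList (vp.toList ++ s.toList) = kv.1 := by
      have hsl : s.toList = kv.1.toList.drop vp.toList.length := by
        have := congrArg String.toList hkvs; simpa using this.symm
      rw [hsl, ← pvPrefixRecon hst]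
      simp
    have hmem2 : (String.ofList (vp.toList ++ s.toList), kv.2) ∈ (PySem.Dict.mk mapping).items := by
      rw [hkeq]
      exact (List.mem_filter.mp hkvmem).1
    have h2 := PySem.Dict.getD_of_mem_items (PySem.Dict.mk mapping) hmem2 hmkkeys ""
    rw [h1, h2]
  · push_neg at hc
    have h1 : tbl.getD s "" = "" := by
      apply PySem.Dict.getD_of_not_contains
      rw [PySem.Dict.contains_eq_decide_mem_keys]
      simp only [decide_eq_false_iff_not]
      intro hmem
      have : s ∈ tbl.items.map Prod.fst := hmem
      rw [htbl, hitems] at this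
      simp only [List.map_map, List.mem_map, Function.comp] at this
      obtain ⟨kv, hkvmem, hkvs⟩ := this
      exact hc kv hkvmem hkvs
    have h2 : (PySem.Dict.mk mapping).getD (String.ofList (vp.toList ++ s.toList)) "" = "" := by
      apply PySem.Dict.getD_of_not_contains
      rw [PySem.Dict.contains_eq_decide_mem_keys]
      simp only [decide_eq_false_iff_not]
      intro hmem
      have : ∃ kv ∈ mapping, kv.1 = String.ofList (vp.toList ++ s.toList) := by
        have : String.ofList (vp.toList ++ s.toList) ∈ mapping.map Prod.fst := hmem
        obtain ⟨kv, hkv, hkv1⟩ := List.mem_map.mp this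
        exact ⟨kv, hkv, hkv1⟩
      obtain ⟨kv, hkvmem, hkv1⟩ := this
      have hkl : kv.1.toList = vp.toList ++ s.toList := by
        have := congrArg String.toList hkv1; simpa using this
      have hst : Q kv = true := by
        rw [hQ]
        simp only [PySem.Str.startswith_eq, PySem.Chars.startswith_iff, hkl]
        exact ⟨s.toList, rfl⟩
      refine hc kv (List.mem_filter.mpr ⟨hkvmem, hst⟩) ?_
      rw [hkl, List.drop_left]
      simp
    rw [h1, h2]

-- ===== VERDICT helper =====
theorem pvMain (mapping : List (String × String)) (kp vp : String)
    (hnd : (mapping.map Prod.fst).Nodup) :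
    pivot_mapping mapping kp vp = pivot_mapping_alt mapping kp vp := by
  unfold pivot_mapping pivot_mapping_alt
  simp only []
  set P : String × String → Bool := fun kv => PySem.Str.startswith kv.1 kp with hP
  have hsearchItems := pvTableItems mapping kp hnd
  have hsearchKeys := pvTableKeysNodup mapping kp hnd
  set search := mapping.foldl
      (fun (d : PySem.Dict String String) kv =>
        if PySem.Str.startswith kv.1 kp then d.insert (String.ofList (kv.1.toList.drop kp.toList.length)) kv.2 else d)
      PySem.Dict.empty with hsearch
  set replace := mapping.foldl
      (fun (d : PySem.Dict String String) kv =>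
        if PySem.Str.startswith kv.1 vp then d.insert (String.ofList (kv.1.toList.drop vp.toList.length)) kv.2 else d)
      PySem.Dict.empty with hreplace
  -- left side: fold over the filtered list
  rw [pvFoldlFilterIf]
  -- right side: keys of search are the suffix images of the filtered list
  have hkeys : search.keys = (mapping.filter P).map
      (fun kv => String.ofList (kv.1.toList.drop kp.toList.length)) := by
    show search.items.map Prod.fst = _
    rw [hsearch, hsearchItems, List.map_map]
    rfl
  rw [hkeys, List.foldl_map]
  congr 1
  apply PySem.List.foldl_congr_mem
  intro acc kv hkv
  have hsv : search.getD (String.ofList (kv.1.toList.drop kp.toList.length)) "" = kv.2 := by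
    apply PySem.Dict.getD_of_mem_items search _ hsearchKeys
    rw [hsearch, hsearchItems]
    exact List.mem_map.mpr ⟨kv, hkv, rfl⟩
  have hrv := pvReplaceLookup mapping vp (String.ofList (kv.1.toList.drop kp.toList.length)) hnd
  rw [hsv, ← hreplace] at *
  rw [hrv]
  congr 2
  simp

theorem pivot_mapping_spec : Claim_equal_pivot_mapping := by
  intro mapping kp vp _ hpre
  unfold Spec_pivot_mapping
  exact pvMain mapping kp vp hpre
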